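-- pv_equiv track=rewrite | github.com/stonefix/misc | hamming.py | _data_bits_covered
-- ===== SOURCE A (Python) =====
-- def _data_bits_covered(parity: int, lim: int):
--
-- 	if not _is_power_of_two(parity):
-- 		raise ValueError("Некорректная последовательность")
--
-- 	data_index  = 1
-- 	total_index = 3
--
-- 	while data_index <= lim:
-- 		curr_bit_is_data = not _is_power_of_two(total_index)
-- 		if curr_bit_is_data and (total_index % (parity << 1)) >= parity:
-- 			yield data_index - 1
-- 		data_index += curr_bit_is_data
-- 		total_index += 1
-- 	return None
--
-- def _is_power_of_two(n: int):
-- 	return (not (n == 0)) and ((n & (n - 1)) == 0)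
-- ===== SOURCE B (Python) =====
-- def _data_bits_covered(parity: int, lim: int):
-- 	if not _is_power_of_two(parity):
-- 		raise ValueError("Некорректная последовательность")
-- 	for data_index in range(lim):
-- 		# closed-form codeword position of the (data_index+1)-th data bit:
-- 		# m = d + k where k is the least k with d + k < 2**k; then m is the
-- 		# d-th non-power-of-two position (>= 3), reached without scanning.
-- 		d = data_index + 1
-- 		k = 1
-- 		while (1 << k) <= d + k:
-- 			k += 1
-- 		# parity is a power of two, so coverage test is a single bit test
-- 		if (d + k) & parity:
-- 			yield data_index
--
-- def _is_power_of_two(n: int):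
-- 	return (not (n == 0)) and ((n & (n - 1)) == 0)
-- ===== Notes on version B (the rewrite author's own statement) =====
-- stated objective: alternative
-- what changed: B drops A's scan over every codeword position with a conditionally-incremented data counter: for each data index it computes the codeword position in closed form (d + k for the least k with d + k < 2**k) and tests coverage with a single bitwise AND against the power-of-two parity instead of A's modular comparison.
import Mathlib
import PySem

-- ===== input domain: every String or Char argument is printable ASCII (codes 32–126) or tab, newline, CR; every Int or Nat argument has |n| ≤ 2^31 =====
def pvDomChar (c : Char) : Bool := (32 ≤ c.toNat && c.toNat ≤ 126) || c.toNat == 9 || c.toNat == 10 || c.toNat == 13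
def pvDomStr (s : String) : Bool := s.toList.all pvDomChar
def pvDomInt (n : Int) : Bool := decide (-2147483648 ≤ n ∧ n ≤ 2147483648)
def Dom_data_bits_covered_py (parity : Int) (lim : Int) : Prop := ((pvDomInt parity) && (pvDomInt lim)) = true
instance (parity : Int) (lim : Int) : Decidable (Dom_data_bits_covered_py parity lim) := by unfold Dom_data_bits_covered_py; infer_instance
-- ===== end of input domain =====

-- B replaces A's scan over every codeword position by a closed-form computation of the codeword
-- position of each data bit (least k with d + k < 2^k gives position d + k) plus a single bit test
-- against the power-of-two parity; return values are identical on Pre_ (objective: alternative).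

-- ===== PORT A =====
-- _is_power_of_two(n) = (not (n == 0)) and ((n & (n - 1)) == 0)
def isPow2 (n : Int) : Bool := (!(n == 0)) && (PySem.Int.band n (n - 1) == 0)

-- The following arithmetic lemmas are cited by the termination proofs of the loops below.
theorem band_neg_neg_lt (a b : Int) (ha : a < 0) (hb : b < 0) : PySem.Int.band a b < 0 := by
  unfold PySem.Int.band
  split_ifs <;> omega

theorem pow2_pos (n : Int) (h : isPow2 n = true) : 0 < n := by
  simp only [isPow2, Bool.and_eq_true, Bool.not_eq_true', beq_eq_false_iff_ne, beq_iff_eq] at h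
  by_contra hle
  have hneg : n < 0 := by omega
  have := band_neg_neg_lt n (n - 1) hneg (by omega)
  omega

theorem nat_odd_band (k : Nat) : (2 * k + 1) &&& (2 * k) = 2 * k := by
  apply Nat.eq_of_testBit_eq
  intro i
  rw [Nat.testBit_land]
  cases i with
  | zero =>
      simp [Nat.testBit_zero, Nat.mul_mod_right]
  | succ j =>
      rw [Nat.testBit_succ, Nat.testBit_succ]
      have h1 : (2 * k + 1) / 2 = k := by omega
      have h2 : (2 * k) / 2 = k := by omega
      rw [h1, h2, Bool.and_self]

theorem pow2_odd (n : Int) (h : isPow2 n = true) (hodd : n % 2 = 1) : n = 1 := by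
  have hpos := pow2_pos n h
  simp only [isPow2, Bool.and_eq_true, Bool.not_eq_true', beq_eq_false_iff_ne, beq_iff_eq] at h
  obtain ⟨-, hband⟩ := h
  obtain ⟨k, hk⟩ : ∃ k : Nat, n = (2 * k + 1 : Nat) := by
    refine ⟨((n - 1) / 2).toNat, ?_⟩
    push_cast
    omega
  subst hk
  have hsub : ((2 * k + 1 : Nat) : Int) - 1 = ((2 * k : Nat) : Int) := by push_cast; ring
  rw [hsub, PySem.Int.band_natCast, nat_odd_band] at hband
  have : k = 0 := by omega
  simp [this]

theorem pow2_succ (n : Int) (h1 : isPow2 n = true) (h2 : isPow2 (n + 1) = true) : n = 1 := by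
  have hpos := pow2_pos n h1
  rcases Int.emod_two_eq_zero_or_one n with he | ho
  · have : (n + 1) % 2 = 1 := by omega
    have := pow2_odd (n + 1) h2 this
    omega
  · exact pow2_odd n h1 ho

-- termination weight of the codeword position: number of remaining consecutive parity positions
def powW (t : Int) : Nat := if isPow2 t then (if isPow2 (t + 1) then 2 else 1) else 0

theorem powW_le (t : Int) : powW t ≤ 2 := by
  unfold powW; split_ifs <;> omega

theorem powW_succ_lt (t : Int) (h : isPow2 t = true) : powW (t + 1) < powW t := by
  unfold powW
  rcases h2 : isPow2 (t + 1) with _ | _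
  · simp [h]
  · have ht : t = 1 := pow2_succ t h h2
    subst ht
    decide

-- while data_index <= lim: …  (the ValueError branch of A is outside Pre_; the port returns [] there)
def loopA (parity lim data total : Int) : List Int :=
  if h : data ≤ lim then
    let curr : Bool := !(isPow2 total)
    (if curr && decide (parity ≤ PySem.Int.mod total (parity <<< (1 : Nat))) then [data - 1] else [])
      ++ loopA parity lim (data + (if curr then 1 else 0)) (total + 1)
  else []
termination_by (3 * (lim + 1 - data)).toNat + powW total
decreasing_by
  by_cases hp : isPow2 total = true
  · have h3 := powW_succ_lt total hp
    simp [hp]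
    omega
  · have h1 := powW_le total
    have h2 := powW_le (total + 1)
    simp only [Bool.not_eq_true] at hp
    simp [hp]
    omega

def data_bits_covered_py (parity : Int) (lim : Int) : List Int :=
  if !(isPow2 parity) then [] else loopA parity lim 1 3

-- ===== PORT B =====
-- cited by kOf's termination proof: 2*k ≤ 2^k
theorem two_mul_le_two_pow (k : Nat) : 2 * k ≤ 2 ^ k := by
  induction k with
  | zero => norm_num
  | succ n ih =>
      cases n with
      | zero => norm_num
      | succ m =>
          have h2 : 2 ^ (m + 2) = 2 * 2 ^ (m + 1) := by ring
          omega

theorem int_two_mul_le_two_pow (k : Nat) : 2 * (k : Int) ≤ 2 ^ k := by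
  have := two_mul_le_two_pow k
  exact_mod_cast this

-- k = 1; while (1 << k) <= d + k: k += 1   (returns the final k)
def kOf (d : Int) (k : Nat) : Nat :=
  if h : (2 : Int) ^ k ≤ d + k then kOf d (k + 1) else k
termination_by (d + 1 - k).toNat
decreasing_by
  have h2 := int_two_mul_le_two_pow k
  have h3 : 2 * (k : Int) ≤ d + k := le_trans h2 h
  omega

-- for data_index in range(lim): …
def loopB (parity lim i : Int) : List Int :=
  if h : i < lim then
    let d := i + 1
    let k := kOf d 1
    (if PySem.Int.band (d + (k : Int)) parity != 0 then [i] else []) ++ loopB parity lim (i + 1)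
  else []
termination_by (lim - i).toNat
decreasing_by omega

def data_bits_covered_py_alt (parity : Int) (lim : Int) : List Int :=
  if !(isPow2 parity) then [] else loopB parity lim 0

-- ===== PRECONDITION & SPEC =====
-- Pre_ excludes exactly the inputs where both Pythons raise ValueError: parity not a power of two.
def Pre_data_bits_covered_py (parity : Int) (lim : Int) : Prop := isPow2 parity = true
instance (parity : Int) (lim : Int) : Decidable (Pre_data_bits_covered_py parity lim) := by unfold Pre_data_bits_covered_py; infer_instance

def pvWitness_data_bits_covered_py : Int × Int := (4, 12)

def Spec_data_bits_covered_py (parity : Int) (lim : Int) (out : List Int) : Prop := out = data_bits_covered_py_alt parity lim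
instance (parity : Int) (lim : Int) (out : List Int) : Decidable (Spec_data_bits_covered_py parity lim out) := by unfold Spec_data_bits_covered_py; infer_instance

-- ===== CLAIM (what is proved, stated in full; the proofs are below) =====
def Claim_equal_data_bits_covered_py : Prop := ∀ (parity : Int) (lim : Int), Dom_data_bits_covered_py parity lim → Pre_data_bits_covered_py parity lim → Spec_data_bits_covered_py parity lim (data_bits_covered_py parity lim)

-- ===== LEMMAS AND PROOFS =====

-- Intermediate form used only by the proofs: A's loop driven by the data index, skipping
-- parity positions with skipPow (the codeword position threaded through the loop).
def skipPow (t : Int) : Int :=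
  if h : isPow2 t then skipPow (t + 1) else t
termination_by powW t
decreasing_by exact powW_succ_lt t h

def loopM (parity lim i total : Int) : List Int :=
  if h : i < lim then
    let t := skipPow total
    (if decide (parity ≤ PySem.Int.mod t (parity <<< (1 : Nat))) then [i] else [])
      ++ loopM parity lim (i + 1) (t + 1)
  else []
termination_by (lim - i).toNat
decreasing_by omega

theorem skipPow_pow (t : Int) (h : isPow2 t = true) : skipPow t = skipPow (t + 1) := by
  rw [skipPow]; simp [h]

theorem skipPow_not (t : Int) (h : isPow2 t = false) : skipPow t = t := by
  rw [skipPow]; simp [h]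

theorem loopM_pow (parity lim i t : Int) (h : isPow2 t = true) :
    loopM parity lim i t = loopM parity lim i (t + 1) := by
  conv_lhs => rw [loopM]
  conv_rhs => rw [loopM]
  rw [skipPow_pow t h]

theorem loopA_eq_loopM_aux (parity lim : Int) :
    ∀ (n : Nat) (data total : Int), (3 * (lim + 1 - data)).toNat + powW total ≤ n →
      loopA parity lim data total = loopM parity lim (data - 1) total := by
  intro n
  induction n with
  | zero =>
      intro data total hn
      have hw := powW_le total
      have hd : ¬ data ≤ lim := by omega
      rw [loopA, loopM]
      rw [dif_neg hd, dif_neg (show ¬ data - 1 < lim by omega)]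
  | succ n ih =>
      intro data total hn
      by_cases h : data ≤ lim
      · by_cases hp : isPow2 total = true
        · rw [loopA]
          simp only [dif_pos h, hp, Bool.not_true, Bool.false_and, Bool.false_eq_true, if_false,
            List.nil_append, add_zero]
          have hm : (3 * (lim + 1 - data)).toNat + powW (total + 1) ≤ n := by
            have := powW_succ_lt total hp; omega
          rw [ih data (total + 1) hm, ← loopM_pow parity lim (data - 1) total hp]
        · rw [loopA]
          simp only [Bool.not_eq_true] at hp
          simp only [dif_pos h, hp, Bool.not_false, Bool.true_and, if_true]
          conv_rhs => rw [loopM]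
          rw [dif_pos (show data - 1 < lim by omega)]
          simp only [skipPow_not total hp]
          have hm : (3 * (lim + 1 - (data + 1))).toNat + powW (total + 1) ≤ n := by
            have h1 := powW_le total
            have h2 := powW_le (total + 1)
            omega
          rw [ih (data + 1) (total + 1) hm]
          rw [show data + 1 - 1 = data - 1 + 1 by ring]
      · have hw := powW_le total
        rw [loopA, loopM]
        rw [dif_neg h, dif_neg (show ¬ data - 1 < lim by omega)]

theorem loopA_eq_loopM (parity lim data total : Int) :
    loopA parity lim data total = loopM parity lim (data - 1) total :=
  loopA_eq_loopM_aux parity lim _ data total le_rfl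

-- characterisation of kOf: least k ≥ start with d + k < 2^k
theorem kOf_spec (d : Int) (k : Nat) :
    k ≤ kOf d k ∧ (∀ j : Nat, k ≤ j → j < kOf d k → (2 : Int) ^ j ≤ d + j) ∧
      d + (kOf d k : Int) < 2 ^ (kOf d k) := by
  fun_induction kOf d k with
  | case1 k hcond ih =>
      simp only [dif_pos hcond] at *
      obtain ⟨ih1, ih2, ih3⟩ := ih
      refine ⟨by omega, ?_, ih3⟩
      intro j hj1 hj2
      rcases Nat.eq_or_lt_of_le hj1 with rfl | hlt
      · exact hcond
      · exact ih2 j hlt hj2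
  | case2 k hcond =>
      exact ⟨le_rfl, by omega, by push_cast at hcond ⊢; omega⟩

theorem kOf_eq (d : Int) (K : Nat) (h1 : 1 ≤ K)
    (h2 : ∀ j : Nat, 1 ≤ j → j < K → (2 : Int) ^ j ≤ d + j)
    (h3 : d + (K : Int) < 2 ^ K) : kOf d 1 = K := by
  obtain ⟨hk1, hall, hlt⟩ := kOf_spec d 1
  rcases Nat.lt_trichotomy (kOf d 1) K with h | h | h
  · have := h2 (kOf d 1) hk1 h
    linarith
  · exact h
  · have := hall K h1 h
    linarith

def posOf (d : Int) : Int := d + (kOf d 1 : Int)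

theorem posOf_bounds (d : Int) (hd : 1 ≤ d) :
    2 ≤ kOf d 1 ∧ (2 : Int) ^ (kOf d 1 - 1) < posOf d ∧ posOf d < 2 ^ (kOf d 1) := by
  obtain ⟨hk1, hall, hlt⟩ := kOf_spec d 1
  have hK2 : 2 ≤ kOf d 1 := by
    by_contra hc
    have h1 : kOf d 1 = 1 := by omega
    rw [h1] at hlt
    norm_num at hlt
    omega
  refine ⟨hK2, ?_, hlt⟩
  have := hall (kOf d 1 - 1) (by omega) (by omega)
  have hc : ((kOf d 1 - 1 : Nat) : Int) = (kOf d 1 : Int) - 1 := by omega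
  rw [hc] at this
  unfold posOf
  linarith

-- power-of-two facts
theorem nat_two_pow_band_pred (p : Nat) : 2 ^ p &&& (2 ^ p - 1) = 0 := by
  apply Nat.eq_of_testBit_eq
  intro i
  rw [Nat.testBit_land]
  by_cases h : i = p
  · subst h
    simp [Nat.testBit_two_pow_sub_one]
  · simp [Nat.testBit_two_pow_of_ne (Ne.symm h)]

theorem isPow2_two_pow (p : Nat) : isPow2 ((2 : Int) ^ p) = true := by
  have hcast : (2 : Int) ^ p = ((2 ^ p : Nat) : Int) := by push_cast; ring
  have hone : (1 : Nat) ≤ 2 ^ p := Nat.one_le_two_pow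
  have hsub : (2 : Int) ^ p - 1 = ((2 ^ p - 1 : Nat) : Int) := by
    rw [hcast]; omega
  unfold isPow2
  rw [hsub, hcast, PySem.Int.band_natCast, nat_two_pow_band_pred]
  have : ((2 ^ p : Nat) : Int) ≠ 0 := by positivity
  simp [this]

theorem nat_even_odd_band (a b : Nat) : (2 * a) &&& (2 * b + 1) = 2 * (a &&& b) := by
  apply Nat.eq_of_testBit_eq
  intro i
  rw [Nat.testBit_land]
  cases i with
  | zero => simp [Nat.testBit_zero, Nat.mul_mod_right]
  | succ j =>
      rw [Nat.testBit_succ, Nat.testBit_succ, Nat.testBit_succ]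
      have h1 : (2 * a) / 2 = a := by omega
      have h2 : (2 * b + 1) / 2 = b := by omega
      have h3 : (2 * (a &&& b)) / 2 = (a &&& b) := by omega
      rw [h1, h2, h3, Nat.testBit_land]

theorem nat_pow2_exists (x : Nat) : x ≠ 0 → x &&& (x - 1) = 0 → ∃ p : Nat, x = 2 ^ p := by
  induction x using Nat.strong_induction_on with
  | _ x ih =>
      intro hx hb
      rcases Nat.even_or_odd x with ⟨k, hk⟩ | ⟨k, hk⟩
      · -- x = 2k, k ≠ 0
        have hk' : x = 2 * k := by omega
        have hk0 : k ≠ 0 := by omega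
        have hsub : x - 1 = 2 * (k - 1) + 1 := by omega
        rw [hsub, hk', nat_even_odd_band] at hb
        have hb' : k &&& (k - 1) = 0 := by omega
        obtain ⟨p, hp⟩ := ih k (by omega) hk0 hb'
        exact ⟨p + 1, by rw [hk', hp]; ring⟩
      · -- x = 2k + 1
        have hk' : x = 2 * k + 1 := by omega
        have hsub : x - 1 = 2 * k := by omega
        rw [hsub, hk', nat_odd_band] at hb
        have : k = 0 := by omega
        exact ⟨0, by omega⟩

theorem pow2_exists (n : Int) (h : isPow2 n = true) : ∃ p : Nat, n = 2 ^ p := by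
  have hpos := pow2_pos n h
  simp only [isPow2, Bool.and_eq_true, Bool.not_eq_true', beq_eq_false_iff_ne, beq_iff_eq] at h
  obtain ⟨-, hband⟩ := h
  have hn : n = (n.toNat : Int) := by omega
  have hsub : n - 1 = ((n.toNat - 1 : Nat) : Int) := by omega
  rw [hsub, hn, PySem.Int.band_natCast] at hband
  have hb0 : n.toNat &&& (n.toNat - 1) = 0 := by exact_mod_cast hband
  obtain ⟨p, hp⟩ := nat_pow2_exists n.toNat (by omega) hb0
  exact ⟨p, by rw [hn, hp]; push_cast; ring⟩

theorem isPow2_two_pow_add_one (p : Nat) (hp : 1 ≤ p) : isPow2 ((2 : Int) ^ p + 1) = false := by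
  have hq : p - 1 + 1 = p := by omega
  have hsplitI : (2 : Int) ^ p = 2 * 2 ^ (p - 1) := by
    conv_lhs => rw [← hq]
    rw [pow_succ']
  have hc1 : (2 : Int) ^ p + 1 = ((2 * 2 ^ (p - 1) + 1 : Nat) : Int) := by
    rw [hsplitI]; push_cast; ring
  have hc2 : (2 : Int) ^ p + 1 - 1 = ((2 * 2 ^ (p - 1) : Nat) : Int) := by
    rw [hsplitI]; push_cast; ring
  unfold isPow2
  rw [hc2, hc1, PySem.Int.band_natCast, nat_odd_band]
  have : ((2 * 2 ^ (p - 1) : Nat) : Int) ≠ 0 := by positivity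
  simp [this]

theorem two_pow_lt_iff (a b : Nat) : (2 : Int) ^ a < 2 ^ b ↔ a < b := by
  constructor
  · intro h
    by_contra hc
    have : (2 : Int) ^ b ≤ 2 ^ a := pow_le_pow_right₀ (by norm_num) (by omega)
    linarith
  · intro h
    exact pow_lt_pow_right₀ (by norm_num) h

-- the key step lemma: advancing A's codeword position past posOf d lands on posOf (d+1)
theorem skipPow_posOf_succ (d : Int) (hd : 1 ≤ d) : skipPow (posOf d + 1) = posOf (d + 1) := by
  obtain ⟨hK2, hlo, hhi⟩ := posOf_bounds d hd
  obtain ⟨hk1, hall, hlt⟩ := kOf_spec d 1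
  by_cases hpow : isPow2 (posOf d + 1) = true
  · obtain ⟨p, hp⟩ := pow2_exists _ hpow
    have hub : (2 : Int) ^ p ≤ 2 ^ (kOf d 1) := by rw [← hp]; linarith
    have hlb : (2 : Int) ^ (kOf d 1 - 1) < 2 ^ p := by rw [← hp]; linarith
    have hpK : p = kOf d 1 := by
      have h1 : p ≤ kOf d 1 := by
        by_contra hc
        have := (two_pow_lt_iff (kOf d 1) p).mpr (by omega)
        linarith
      have h2 : kOf d 1 - 1 < p := (two_pow_lt_iff (kOf d 1 - 1) p).mp hlb
      omega
    subst hpK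
    -- posOf d + 1 = 2^K; skip it to 2^K + 1
    have hskip : skipPow (posOf d + 1) = (2 : Int) ^ (kOf d 1) + 1 := by
      rw [hp, skipPow_pow _ (isPow2_two_pow _), skipPow_not _ (isPow2_two_pow_add_one _ (by omega))]
    rw [hskip]
    have hKnew : kOf (d + 1) 1 = kOf d 1 + 1 := by
      apply kOf_eq
      · omega
      · intro j hj1 hj2
        rcases Nat.lt_or_ge j (kOf d 1) with hlt' | hge
        · have := hall j hj1 hlt'
          linarith
        · have hjK : j = kOf d 1 := by omega
          have hpj : (2 : Int) ^ j = posOf d + 1 := by rw [hjK, ← hp]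
          unfold posOf at hpj
          rw [hjK]
          push_cast at hpj ⊢
          rw [hjK] at hpj
          linarith
      · have h4 : (2 : Int) ^ 2 ≤ 2 ^ (kOf d 1) := pow_le_pow_right₀ (by norm_num) hK2
        have hpow' : (2 : Int) ^ (kOf d 1 + 1) = 2 * 2 ^ (kOf d 1) := by ring
        have heq : posOf d + 1 = (2 : Int) ^ (kOf d 1) := hp
        unfold posOf at heq
        push_cast
        norm_num at h4
        rw [hpow']
        push_cast at heq
        linarith
    unfold posOf
    rw [hKnew]
    have heq : posOf d + 1 = (2 : Int) ^ (kOf d 1) := hp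
    unfold posOf at heq
    push_cast
    push_cast at heq
    linarith
  · have hF : isPow2 (posOf d + 1) = false := by simpa using hpow
    rw [skipPow_not _ hF]
    have hstrict : posOf d + 1 < 2 ^ (kOf d 1) := by
      rcases lt_or_eq_of_le (show posOf d + 1 ≤ 2 ^ (kOf d 1) by linarith) with h | h
      · exact h
      · exfalso
        rw [h, isPow2_two_pow] at hF
        simp at hF
    have hKnew : kOf (d + 1) 1 = kOf d 1 := by
      apply kOf_eq
      · omega
      · intro j hj1 hj2
        have := hall j hj1 hj2
        linarith
      · unfold posOf at hstrict
        linarith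
    unfold posOf
    rw [hKnew]
    ring

-- Python testBit characterisation
theorem nat_testBit_iff (x i : Nat) : x.testBit i ↔ (x / 2 ^ i % 2 = 1) := by
  rw [Nat.testBit, Nat.shiftRight_eq_div_pow]
  rcases Nat.mod_two_eq_zero_or_one (x / 2 ^ i) with h | h <;> simp [Nat.and_one_is_mod, h]

theorem nat_cover (a p : Nat) : (2 ^ p ≤ a % (2 ^ p * 2)) ↔ a &&& 2 ^ p ≠ 0 := by
  rw [Nat.mod_mul, Nat.and_two_pow]
  have hb : a % 2 ^ p < 2 ^ p := Nat.mod_lt _ (by positivity)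
  rcases Nat.mod_two_eq_zero_or_one (a / 2 ^ p) with h | h
  · have ht : a.testBit p = false := by
      rw [Bool.eq_false_iff]
      intro hc
      have := (nat_testBit_iff a p).mp hc
      omega
    rw [ht, h]
    simp
    omega
  · have ht : a.testBit p = true := (nat_testBit_iff a p).mpr h
    rw [ht, h]
    have hpp : 0 < 2 ^ p := by positivity
    simp

-- the coverage test: for power-of-two parity, the modular test is the bit test
theorem cond_iff (p : Nat) (m : Int) (hm : 0 ≤ m) :
    ((2 : Int) ^ p ≤ PySem.Int.mod m ((2 : Int) ^ p <<< (1 : Nat))) ↔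
      PySem.Int.band m ((2 : Int) ^ p) ≠ 0 := by
  have hshift : (2 : Int) ^ p <<< (1 : Nat) = ((2 ^ p * 2 : Nat) : Int) := by
    rw [Int.shiftLeft_eq]
    push_cast
    ring
  have hcast : (2 : Int) ^ p = ((2 ^ p : Nat) : Int) := by push_cast; ring
  have hmm : m = (m.toNat : Int) := by omega
  rw [hshift, hcast, hmm, PySem.Int.mod_natCast, PySem.Int.band_natCast]
  have h1 : ((2 ^ p : Nat) : Int) ≤ ((m.toNat % (2 ^ p * 2) : Nat) : Int) ↔
      2 ^ p ≤ m.toNat % (2 ^ p * 2) := by exact_mod_cast Iff.rfl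
  have h2 : ((m.toNat &&& 2 ^ p : Nat) : Int) ≠ 0 ↔ m.toNat &&& 2 ^ p ≠ 0 := by
    exact_mod_cast not_congr (by exact_mod_cast Iff.rfl)
  rw [h1, h2]
  exact nat_cover m.toNat p

theorem posOf_pos (d : Int) (hd : 1 ≤ d) : 0 ≤ posOf d := by
  obtain ⟨hk1, -, -⟩ := kOf_spec d 1
  unfold posOf
  omega

theorem loopM_eq_loopB (lim : Int) (p : Nat) :
    ∀ (n : Nat) (i total : Int), (lim - i).toNat ≤ n → 0 ≤ i → skipPow total = posOf (i + 1) →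
      loopM ((2 : Int) ^ p) lim i total = loopB ((2 : Int) ^ p) lim i := by
  intro n
  induction n with
  | zero =>
      intro i total hn hi ht
      rw [loopM, loopB, dif_neg (by omega), dif_neg (by omega)]
  | succ n ih =>
      intro i total hn hi ht
      by_cases h : i < lim
      · rw [loopM, loopB, dif_pos h, dif_pos h]
        simp only []
        have hd1 : 1 ≤ i + 1 := by omega
        have hposeq : skipPow total = (i + 1) + ((kOf (i + 1) 1 : Nat) : Int) := ht
        have hcond : decide ((2 : Int) ^ p ≤ PySem.Int.mod (skipPow total) ((2 : Int) ^ p <<< (1 : Nat)))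
            = (PySem.Int.band ((i + 1) + ((kOf (i + 1) 1 : Nat) : Int)) ((2 : Int) ^ p) != 0) := by
          rw [hposeq]
          have := cond_iff p ((i + 1) + ((kOf (i + 1) 1 : Nat) : Int)) (posOf_pos (i + 1) hd1)
          by_cases hc : PySem.Int.band ((i + 1) + ((kOf (i + 1) 1 : Nat) : Int)) ((2 : Int) ^ p) = 0
          · simp [hc, this]
          · simp [hc, this.mpr hc]
        rw [hcond]
        congr 1
        apply ih (i + 1) (skipPow total + 1) (by omega) (by omega)
        rw [ht]
        exact skipPow_posOf_succ (i + 1) hd1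
      · rw [loopM, loopB, dif_neg h, dif_neg h]

theorem pos_one : posOf 1 = 3 := by
  have h : kOf 1 1 = 2 := by
    apply kOf_eq
    · omega
    · intro j hj1 hj2
      interval_cases j
      norm_num
    · norm_num
  unfold posOf
  rw [h]
  norm_num

-- ===== VERDICT (by name: the statement is the Claim_ definition above) =====
theorem data_bits_covered_py_spec : Claim_equal_data_bits_covered_py := by
  unfold Claim_equal_data_bits_covered_py
  intro parity lim _ hpre
  unfold Spec_data_bits_covered_py data_bits_covered_py data_bits_covered_py_alt
  unfold Pre_data_bits_covered_py at hpre
  rw [hpre]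
  simp only [Bool.not_true, Bool.false_eq_true, if_false]
  obtain ⟨p, hp⟩ := pow2_exists parity hpre
  subst hp
  have h1 : loopA ((2:Int) ^ p) lim 1 3 = loopM ((2:Int) ^ p) lim 0 3 := by
    have := loopA_eq_loopM ((2:Int) ^ p) lim 1 3
    norm_num at this
    exact this
  rw [h1]
  apply loopM_eq_loopB lim p (lim - 0).toNat 0 3 le_rfl le_rfl
  rw [skipPow_not 3 (by decide), show (0:Int) + 1 = 1 by ring, pos_one]
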